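-- pv_equiv track=rewrite | github.com/miabobia/aoc_2024 | 6/main.py | get_starting_pos_and_dir
-- ===== SOURCE A (Python) =====
-- from typing import List, Tuple
--
-- def get_starting_pos_and_dir(area: List[List[str]]) -> Tuple[int, int, int]:
--     def map_dir(cell: chr) -> int:
--         match cell:
--             case '^':
--                 return 0
--             case '>':
--                 return 1
--             case 'v':
--                 return 2
--             case '<':
--                 return 3
--         return -1
--
--     for i, row in enumerate(area):
--         for j, cell in enumerate(row):
--             dir = map_dir(cell)
--             if dir != -1:
--                 return (j, i, dir)
--     return None
-- ===== SOURCE B (Python) =====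
-- def get_starting_pos_and_dir(area):
--     def first_pos(marker):
--         for i, row in enumerate(area):
--             if marker in row:
--                 return (i, row.index(marker))
--         return None
--
--     best = None
--     for d, marker in enumerate('^>v<'):
--         pos = first_pos(marker)
--         if pos is None:
--             continue
--         cand = (pos[0], pos[1], d)
--         if best is None or cand < best:
--             best = cand
--     return None if best is None else (best[1], best[0], best[2])
-- ===== Notes on version B (the rewrite author's own statement) =====
-- stated objective: alternative
-- what changed: Replaces A's single early-exit nested scan that maps each cell through a match statement by four marker-directed searches ('marker in row' + row.index per direction character) whose first occurrences are then combined by a lexicographic-minimum selection over (row, col).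
import Mathlib
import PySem

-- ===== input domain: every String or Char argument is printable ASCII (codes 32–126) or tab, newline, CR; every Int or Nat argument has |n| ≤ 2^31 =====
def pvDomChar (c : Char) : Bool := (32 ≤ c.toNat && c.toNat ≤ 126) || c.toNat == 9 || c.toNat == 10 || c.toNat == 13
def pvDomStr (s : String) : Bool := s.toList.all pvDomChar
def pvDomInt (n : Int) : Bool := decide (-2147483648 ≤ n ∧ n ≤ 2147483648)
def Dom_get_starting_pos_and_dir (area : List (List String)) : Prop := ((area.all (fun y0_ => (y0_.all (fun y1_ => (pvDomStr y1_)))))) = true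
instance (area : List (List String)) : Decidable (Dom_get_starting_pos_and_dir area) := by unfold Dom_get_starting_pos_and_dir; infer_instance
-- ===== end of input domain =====

-- B replaces A's single early-exit nested scan by four marker-directed searches
-- (membership + list.index per marker) followed by a lexicographic-minimum
-- selection (alternative decomposition; same asymptotic cost).


-- ===== PORT A =====
-- inner helper map_dir: the match statement, in order, else -1
def pvMapDir (cell : String) : Int :=
  if cell = "^" then 0
  else if cell = ">" then 1
  else if cell = "v" then 2
  else if cell = "<" then 3
  else -1

-- the inner 'for j, cell in enumerate(row)' with early return
def pvScanRow (i : Int) (j : Int) (row : List String) : Option (Int × Int × Int) :=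
  match row with
  | [] => none
  | cell :: rest =>
    let dir := pvMapDir cell
    if dir ≠ -1 then some (j, i, dir) else pvScanRow i (j + 1) rest

-- the outer 'for i, row in enumerate(area)' with early return
def pvScanArea (i : Int) (area : List (List String)) : Option (Int × Int × Int) :=
  match area with
  | [] => none
  | row :: rest =>
    match pvScanRow i 0 row with
    | some t => some t
    | none => pvScanArea (i + 1) rest

def get_starting_pos_and_dir (area : List (List String)) : Option (Int × Int × Int) :=
  pvScanArea 0 area

-- ===== PORT B =====
-- first_pos(marker): first row containing marker, and marker's first index there
def pvFirstPos (marker : String) (i : Int) (rows : List (List String)) : Option (Int × Int) :=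
  match rows with
  | [] => none
  | row :: rest =>
    if marker ∈ row then
      match PySem.List.index? row marker with
      | some j => some (i, (j : Int))
      | none => none   -- unreachable: guarded by the membership test, as in Python
    else pvFirstPos marker (i + 1) rest

-- Python tuple comparison cand < best on (i, j, d) triples
def pvLt3 (a b : Int × Int × Int) : Bool :=
  a.1 < b.1 || (a.1 == b.1 && (a.2.1 < b.2.1 || (a.2.1 == b.2.1 && a.2.2 < b.2.2)))

-- 'if best is None or cand < best: best = cand'
def pvBetter (best : Option (Int × Int × Int)) (cand : Int × Int × Int) : Option (Int × Int × Int) :=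
  match best with
  | none => some cand
  | some b => if pvLt3 cand b then some cand else best

-- one iteration of the 'for d, marker in enumerate(...)' loop body
def pvStep (area : List (List String)) (best : Option (Int × Int × Int)) (dm : Int × String) :
    Option (Int × Int × Int) :=
  match pvFirstPos dm.2 0 area with
  | none => best
  | some pos => pvBetter best (pos.1, pos.2, dm.1)

def get_starting_pos_and_dir_alt (area : List (List String)) : Option (Int × Int × Int) :=
  let best := (PySem.List.enumerate ["^", ">", "v", "<"]).foldl (pvStep area) none
  match best with
  | none => none
  | some b => some (b.2.1, b.1, b.2.2)

-- ===== PRECONDITION & SPEC =====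
def Spec_get_starting_pos_and_dir (area : List (List String)) (out : Option (Int × Int × Int)) : Prop := out = get_starting_pos_and_dir_alt area
instance (area : List (List String)) (out : Option (Int × Int × Int)) : Decidable (Spec_get_starting_pos_and_dir area out) := by unfold Spec_get_starting_pos_and_dir; infer_instance

-- ===== CLAIM (what is proved, stated in full; the proofs are below) =====
def Claim_equal_get_starting_pos_and_dir : Prop := ∀ (area : List (List String)), Dom_get_starting_pos_and_dir area → Spec_get_starting_pos_and_dir area (get_starting_pos_and_dir area)

-- ===== LEMMAS AND PROOFS =====

-- the row-major list of all marker hits, as (row, col, dir) triples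
def pvHitsRow (i j : Int) (row : List String) : List (Int × Int × Int) :=
  (PySem.List.enumerate row j).filterMap (fun q =>
    if pvMapDir q.2 ≠ -1 then some (i, q.1, pvMapDir q.2) else none)

def pvHits (i : Int) (rows : List (List String)) : List (Int × Int × Int) :=
  (PySem.List.enumerate rows i).flatMap (fun p => pvHitsRow p.1 0 p.2)

-- strict lexicographic order on the (row, col) position
def pvLexLt (a b : Int × Int × Int) : Prop := a.1 < b.1 ∨ (a.1 = b.1 ∧ a.2.1 < b.2.1)

-- ---- A's scan is the head of the hits list ----
theorem pvScanRow_eq (i : Int) (row : List String) (j : Int) :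
    pvScanRow i j row = (pvHitsRow i j row).head?.map (fun t => (t.2.1, t.1, t.2.2)) := by
  induction row generalizing j with
  | nil => simp [pvScanRow, pvHitsRow, PySem.List.enumerate_nil]
  | cons cell rest ih =>
    simp only [pvHitsRow, PySem.List.enumerate_cons, List.filterMap_cons]
    by_cases h : pvMapDir cell ≠ (-1 : Int)
    · simp [pvScanRow, h]
    · simpa [pvScanRow, h, pvHitsRow] using ih (j + 1)

theorem pvScanArea_eq (area : List (List String)) (i : Int) :
    pvScanArea i area = (pvHits i area).head?.map (fun t => (t.2.1, t.1, t.2.2)) := by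
  induction area generalizing i with
  | nil => simp [pvScanArea, pvHits, PySem.List.enumerate_nil]
  | cons row rest ih =>
    simp only [pvHits, PySem.List.enumerate_cons, List.flatMap_cons, List.head?_append]
    simp only [pvScanArea]
    rw [pvScanRow_eq i row 0, ih (i + 1)]
    cases h : (pvHitsRow i 0 row).head? <;> simp [pvHits]

-- ---- membership and sortedness of the hits list ----
theorem mem_pvHitsRow {t : Int × Int × Int} {i j : Int} {row : List String} (h : t ∈ pvHitsRow i j row) :
    t.1 = i ∧ j ≤ t.2.1 := by
  simp only [pvHitsRow, List.mem_filterMap] at h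
  obtain ⟨q, hq, hf⟩ := h
  rw [PySem.List.mem_enumerate_iff] at hq
  obtain ⟨k, hk, rfl⟩ := hq
  by_cases hd : pvMapDir (row[k]) ≠ (-1 : Int) <;> simp [hd] at hf
  subst hf; exact ⟨rfl, by simp⟩

theorem pairwise_pvHitsRow (i j : Int) (row : List String) :
    (pvHitsRow i j row).Pairwise (fun a b => a.2.1 < b.2.1) := by
  induction row generalizing j with
  | nil => simp [pvHitsRow, PySem.List.enumerate_nil]
  | cons cell rest ih =>
    simp only [pvHitsRow, PySem.List.enumerate_cons, List.filterMap_cons]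
    by_cases h : pvMapDir cell ≠ (-1 : Int)
    · rw [if_pos h]
      refine List.Pairwise.cons ?_ (ih (j + 1))
      intro b hb
      have := (mem_pvHitsRow (t := b) (i := i) (j := j + 1) (row := rest) (by simpa [pvHitsRow] using hb)).2
      simp only; omega
    · simpa [h, pvHitsRow] using ih (j + 1)

theorem mem_pvHits {t : Int × Int × Int} {i : Int} {rows : List (List String)} (h : t ∈ pvHits i rows) :
    i ≤ t.1 := by
  simp only [pvHits, List.mem_flatMap] at h
  obtain ⟨p, hp, ht⟩ := h
  rw [PySem.List.mem_enumerate_iff] at hp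
  obtain ⟨k, hk, rfl⟩ := hp
  have := (mem_pvHitsRow ht).1
  simp at this; omega

theorem pairwise_pvHits (i : Int) (rows : List (List String)) :
    (pvHits i rows).Pairwise pvLexLt := by
  induction rows generalizing i with
  | nil => simp [pvHits, PySem.List.enumerate_nil]
  | cons row rest ih =>
    simp only [pvHits, PySem.List.enumerate_cons, List.flatMap_cons]
    rw [List.pairwise_append]
    refine ⟨?_, by simpa [pvHits] using ih (i + 1), ?_⟩
    · have hp := pairwise_pvHitsRow i 0 row
      refine hp.imp_of_mem ?_
      intro a b ha hb hlt
      have h1 := (mem_pvHitsRow ha).1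
      have h2 := (mem_pvHitsRow hb).1
      exact Or.inr ⟨by omega, hlt⟩
    · intro a ha b hb
      have h1 := (mem_pvHitsRow ha).1
      have h2 := mem_pvHits (t := b) (i := i + 1) (rows := rest) (by simpa [pvHits] using hb)
      exact Or.inl (by omega)

-- every hit's direction is one of 0..3
theorem pvHits_dir {t : Int × Int × Int} {i : Int} {rows : List (List String)} (h : t ∈ pvHits i rows) :
    t.2.2 = 0 ∨ t.2.2 = 1 ∨ t.2.2 = 2 ∨ t.2.2 = 3 := by
  simp only [pvHits, List.mem_flatMap] at h
  obtain ⟨p, _, ht⟩ := h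
  simp only [pvHitsRow, List.mem_filterMap] at ht
  obtain ⟨q, _, hf⟩ := ht
  by_cases hd : pvMapDir q.2 ≠ (-1 : Int) <;> simp [hd] at hf
  subst hf
  simp only [pvMapDir] at hd ⊢
  split_ifs at hd ⊢ <;> simp_all

-- ---- B's staged search per marker is the head of the matching filter ----
-- one row: the filter of the row hits by direction is the occurrence list of the marker
theorem pvRowFilter (m : String) (dm : Int) (hm : ∀ c, pvMapDir c = dm ↔ c = m)
    (i j : Int) (row : List String) :
    (pvHitsRow i j row).filter (fun t => t.2.2 = dm) =
      (PySem.List.enumerate row j).filterMap (fun q => if q.2 = m then some (i, q.1, dm) else none) := by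
  induction row generalizing j with
  | nil => simp [pvHitsRow, PySem.List.enumerate_nil]
  | cons cell rest ih =>
    simp only [pvHitsRow, PySem.List.enumerate_cons, List.filterMap_cons]
    by_cases hc : cell = m
    · subst hc
      have h1 : pvMapDir cell = dm := (hm cell).mpr rfl
      have h2 : pvMapDir cell ≠ -1 := by
        intro h
        have hd : dm = -1 := by rw [← h1, h]
        have a1 : ("." : String) = cell := (hm ".").mp (by rw [hd]; decide)
        have a2 : ("," : String) = cell := (hm ",").mp (by rw [hd]; decide)
        rw [← a1] at a2; exact absurd a2 (by decide)
      rw [if_pos h2, List.filter_cons]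
      simp only [pvHitsRow, ite_not] at ih
      simp [h1, ih (j + 1)]
    · have h1 : pvMapDir cell ≠ dm := fun h => hc ((hm cell).mp h)
      by_cases h2 : pvMapDir cell ≠ (-1 : Int)
      · rw [if_pos h2, List.filter_cons]
        simp [h1, hc, pvHitsRow] at ih ⊢
        exact ih (j + 1)
      · rw [if_neg h2]
        simp [hc, pvHitsRow] at ih ⊢
        exact ih (j + 1)

-- one row, marker absent: no hits with this direction
theorem pvRowFilter_none (m : String) (dm : Int) (hm : ∀ c, pvMapDir c = dm ↔ c = m)
    (i j : Int) (row : List String) (habs : m ∉ row) :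
    (pvHitsRow i j row).filter (fun t => t.2.2 = dm) = [] := by
  rw [pvRowFilter m dm hm i j row]
  rw [List.filterMap_eq_nil_iff]
  intro q hq
  rw [PySem.List.mem_enumerate_iff] at hq
  obtain ⟨k, hk, rfl⟩ := hq
  have : row[k] ≠ m := fun h => habs (h ▸ List.getElem_mem hk)
  simp [this]

-- one row, marker present: head of the occurrence list is (i, index, dm)
theorem pvRowIndex (m : String) (dm' i j : Int) (row : List String) :
    ((PySem.List.enumerate row j).filterMap
        (fun q => if q.2 = m then some (i, q.1, dm') else none)).head? =
      (PySem.List.index? row m).map (fun k => (i, j + (k : Int), dm')) := by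
  induction row generalizing j with
  | nil => simp [PySem.List.enumerate_nil, PySem.List.index?_eq_idxOf?, List.idxOf?]
  | cons cell rest ih =>
    simp only [PySem.List.enumerate_cons, List.filterMap_cons]
    by_cases hc : cell = m
    · subst hc
      rw [PySem.List.index?_cons_self]
      simp
    · rw [PySem.List.index?_cons_of_ne rest hc, if_neg hc]
      rw [ih (j + 1)]
      cases PySem.List.index? rest m <;> simp
      ring

-- the staged search equals the head of the direction filter of the hits list
theorem pvFirstPos_eq (m : String) (dm : Int) (hm : ∀ c, pvMapDir c = dm ↔ c = m)
    (i : Int) (rows : List (List String)) :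
    pvFirstPos m i rows =
      ((pvHits i rows).filter (fun t => t.2.2 = dm)).head?.map (fun t => (t.1, t.2.1)) := by
  induction rows generalizing i with
  | nil => simp [pvFirstPos, pvHits, PySem.List.enumerate_nil]
  | cons row rest ih =>
    simp only [pvHits, PySem.List.enumerate_cons, List.flatMap_cons, List.filter_append,
      List.head?_append]
    by_cases hmem : m ∈ row
    · simp only [pvFirstPos, hmem, if_pos]
      rw [pvRowFilter m dm hm i 0 row, pvRowIndex m dm i 0 row]
      have hsome : (PySem.List.index? row m).isSome := (PySem.List.index?_isSome_iff row m).mpr hmem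
      cases hidx : PySem.List.index? row m with
      | none => rw [hidx] at hsome; simp at hsome
      | some k => simp
    · simp only [pvFirstPos, hmem]
      rw [pvRowFilter_none m dm hm i 0 row hmem]
      simpa [pvFirstPos, hmem, pvHits] using ih (i + 1)

-- ---- facts about the minimum-selection step ----
theorem pvLt3_iff (a b : Int × Int × Int) :
    pvLt3 a b = true ↔ (a.1 < b.1 ∨ (a.1 = b.1 ∧ (a.2.1 < b.2.1 ∨ (a.2.1 = b.2.1 ∧ a.2.2 < b.2.2)))) := by
  simp [pvLt3]

theorem pvLt3_of_lex {a b : Int × Int × Int} (h : pvLexLt a b) : pvLt3 a b = true := by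
  rw [pvLt3_iff]
  rcases h with h1 | ⟨h1, h2⟩
  · exact Or.inl h1
  · exact Or.inr ⟨h1, Or.inl h2⟩

theorem pvLt3_false_of_lex {a b : Int × Int × Int} (h : pvLexLt a b) : pvLt3 b a = false := by
  rw [Bool.eq_false_iff]
  intro hb
  rw [pvLt3_iff] at hb
  rcases h with h1 | ⟨h1, h2⟩ <;> rcases hb with g1 | ⟨g1, g2 | ⟨g2, g3⟩⟩ <;> omega

-- an accumulator that is none or strictly above h stays so under a candidate above h
theorem pvBetter_nog {h c : Int × Int × Int} {b : Option (Int × Int × Int)}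
    (hb : b = none ∨ ∃ x, b = some x ∧ pvLexLt h x) (hc : pvLexLt h c) :
    pvBetter b c = none ∨ ∃ x, pvBetter b c = some x ∧ pvLexLt h x := by
  rcases hb with rfl | ⟨x, rfl, hx⟩
  · right; exact ⟨c, rfl, hc⟩
  · simp only [pvBetter]
    by_cases hlt : pvLt3 c x = true
    · rw [if_pos hlt]; right; exact ⟨c, rfl, hc⟩
    · rw [if_neg hlt]; right; exact ⟨x, rfl, hx⟩

-- from such an accumulator, the true minimum wins
theorem pvBetter_take {h : Int × Int × Int} {b : Option (Int × Int × Int)}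
    (hb : b = none ∨ ∃ x, b = some x ∧ pvLexLt h x) :
    pvBetter b h = some h := by
  rcases hb with rfl | ⟨x, rfl, hx⟩
  · rfl
  · simp only [pvBetter]
    rw [if_pos (pvLt3_of_lex hx)]

-- the minimum, once found, is kept against candidates above it
theorem pvBetter_keep {h c : Int × Int × Int} (hc : pvLexLt h c) :
    pvBetter (some h) c = some h := by
  simp only [pvBetter]
  rw [pvLt3_false_of_lex hc]
  simp

-- characterisations of pvMapDir for the four markers
theorem pvMapDir_zero : ∀ c, pvMapDir c = 0 ↔ c = "^" := by
  intro c; simp only [pvMapDir]; split_ifs <;> simp_all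
theorem pvMapDir_one : ∀ c, pvMapDir c = 1 ↔ c = ">" := by
  intro c; simp only [pvMapDir]; split_ifs <;> simp_all
theorem pvMapDir_two : ∀ c, pvMapDir c = 2 ↔ c = "v" := by
  intro c; simp only [pvMapDir]; split_ifs <;> simp_all
theorem pvMapDir_three : ∀ c, pvMapDir c = 3 ↔ c = "<" := by
  intro c; simp only [pvMapDir]; split_ifs <;> simp_all

-- accumulator invariant: none, or strictly above the row-major-first hit h
def pvNog (h : Int × Int × Int) (b : Option (Int × Int × Int)) : Prop :=
  b = none ∨ ∃ x, b = some x ∧ pvLexLt h x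

-- candidate shape for a marker other than h's: absent, or strictly above h
def pvAbove (h : Int × Int × Int) (area : List (List String)) (dm : Int × String) : Prop :=
  pvFirstPos dm.2 0 area = none ∨
    ∃ q, pvFirstPos dm.2 0 area = some q ∧ pvLexLt h (q.1, q.2, dm.1)

theorem pvStep_none {area : List (List String)} {m : String}
    (hc : pvFirstPos m 0 area = none) (b : Option (Int × Int × Int)) (k : Int) :
    pvStep area b (k, m) = b := by
  unfold pvStep; rw [hc]

theorem pvStep_nog {h : Int × Int × Int} {area : List (List String)} {k : Int} {m : String}
    {b : Option (Int × Int × Int)} (hb : pvNog h b) (hc : pvAbove h area (k, m)) :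
    pvNog h (pvStep area b (k, m)) := by
  unfold pvStep
  rcases hc with hc | ⟨q, hc, hq⟩
  · rw [hc]; exact hb
  · rw [hc]; exact pvBetter_nog hb hq

theorem pvStep_min {h : Int × Int × Int} {area : List (List String)} {k : Int} {m : String}
    {b : Option (Int × Int × Int)} (hb : pvNog h b)
    (hc : pvFirstPos m 0 area = some (h.1, h.2.1)) (hk : k = h.2.2) :
    pvStep area b (k, m) = some h := by
  unfold pvStep
  rw [hc]
  show pvBetter b (h.1, h.2.1, k) = some h
  rw [hk]
  exact pvBetter_take hb

theorem pvStep_keep {h : Int × Int × Int} {area : List (List String)} {k : Int} {m : String}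
    (hc : pvAbove h area (k, m)) : pvStep area (some h) (k, m) = some h := by
  unfold pvStep
  rcases hc with hc | ⟨q, hc, hq⟩
  · rw [hc]
  · rw [hc]; exact pvBetter_keep hq

-- head of the direction filter: h's own direction yields h itself …
theorem pvFilterHead_self {h : Int × Int × Int} (t : List (Int × Int × Int)) {k : Int}
    (hk : h.2.2 = k) :
    (((h :: t).filter (fun x => x.2.2 = k)).head?).map (fun x => (x.1, x.2.1)) =
      some (h.1, h.2.1) := by
  simp [hk]

-- … and any other direction yields nothing or a hit strictly above h
theorem pvFilterHead_ne {h : Int × Int × Int} {t : List (Int × Int × Int)}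
    (habove : ∀ q ∈ t, pvLexLt h q) {k : Int} (hk : ¬ h.2.2 = k) :
    ((((h :: t).filter (fun x => x.2.2 = k)).head?).map (fun x => (x.1, x.2.1)) = none) ∨
    ∃ q, (((h :: t).filter (fun x => x.2.2 = k)).head?).map (fun x => (x.1, x.2.1)) = some q ∧
      pvLexLt h (q.1, q.2, k) := by
  have hfc : (h :: t).filter (fun x => decide (x.2.2 = k)) =
      t.filter (fun x => decide (x.2.2 = k)) := by
    simp [hk]
  rw [hfc]
  cases hq : (t.filter (fun x => decide (x.2.2 = k))).head? with
  | none => left; rfl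
  | some q =>
    right
    refine ⟨(q.1, q.2.1), rfl, ?_⟩
    have hmem : q ∈ t := List.mem_of_mem_filter (List.mem_of_mem_head? hq)
    exact habove q hmem

-- ===== VERDICT (by name: the statement is the Claim_ definition above) =====
theorem get_starting_pos_and_dir_spec : Claim_equal_get_starting_pos_and_dir := by
  intro area _
  unfold Spec_get_starting_pos_and_dir get_starting_pos_and_dir get_starting_pos_and_dir_alt
  rw [pvScanArea_eq area 0]
  simp only [PySem.List.enumerate_cons, PySem.List.enumerate_nil, List.foldl_cons, List.foldl_nil]
  norm_num
  cases hL : pvHits 0 area with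
  | nil =>
    have E : ∀ m dm, (∀ c, pvMapDir c = dm ↔ c = m) → pvFirstPos m 0 area = none := by
      intro m dm hm
      rw [pvFirstPos_eq m dm hm 0 area, hL]
      rfl
    rw [pvStep_none (E "^" 0 pvMapDir_zero), pvStep_none (E ">" 1 pvMapDir_one),
        pvStep_none (E "v" 2 pvMapDir_two), pvStep_none (E "<" 3 pvMapDir_three)]
    rfl
  | cons h t =>
    have hpw := pairwise_pvHits 0 area
    rw [hL, List.pairwise_cons] at hpw
    have habove := hpw.1
    have hmem : h ∈ pvHits 0 area := by rw [hL]; exact List.mem_cons_self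
    have hd := pvHits_dir hmem
    have E : ∀ m dm, (∀ c, pvMapDir c = dm ↔ c = m) →
        pvFirstPos m 0 area =
          (((h :: t).filter (fun x => x.2.2 = dm)).head?).map (fun x => (x.1, x.2.1)) := by
      intro m dm hm
      rw [pvFirstPos_eq m dm hm 0 area, hL]
    have Eself : ∀ m, (∀ c, pvMapDir c = h.2.2 ↔ c = m) →
        pvFirstPos m 0 area = some (h.1, h.2.1) := by
      intro m hm
      rw [E m h.2.2 hm]
      exact pvFilterHead_self t rfl
    have Eab : ∀ m dm, (∀ c, pvMapDir c = dm ↔ c = m) → ¬ h.2.2 = dm →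
        pvAbove h area (dm, m) := by
      intro m dm hm hne
      unfold pvAbove
      simp only
      rw [E m dm hm]
      exact pvFilterHead_ne habove hne
    obtain ⟨i0, j0, d0⟩ := h
    rcases hd with hd | hd | hd | hd <;> simp only at hd <;> subst hd
    · rw [pvStep_min (Or.inl rfl) (Eself "^" pvMapDir_zero) rfl,
          pvStep_keep (Eab ">" 1 pvMapDir_one (by norm_num)),
          pvStep_keep (Eab "v" 2 pvMapDir_two (by norm_num)),
          pvStep_keep (Eab "<" 3 pvMapDir_three (by norm_num))]
      rfl
    · have n0 := pvStep_nog (h := (i0, j0, 1)) (b := none) (Or.inl rfl)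
        (Eab "^" 0 pvMapDir_zero (by norm_num))
      rw [pvStep_min n0 (Eself ">" pvMapDir_one) rfl,
          pvStep_keep (Eab "v" 2 pvMapDir_two (by norm_num)),
          pvStep_keep (Eab "<" 3 pvMapDir_three (by norm_num))]
      rfl
    · have n0 := pvStep_nog (h := (i0, j0, 2)) (b := none) (Or.inl rfl)
        (Eab "^" 0 pvMapDir_zero (by norm_num))
      have n1 := pvStep_nog n0 (Eab ">" 1 pvMapDir_one (by norm_num))
      rw [pvStep_min n1 (Eself "v" pvMapDir_two) rfl,
          pvStep_keep (Eab "<" 3 pvMapDir_three (by norm_num))]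
      rfl
    · have n0 := pvStep_nog (h := (i0, j0, 3)) (b := none) (Or.inl rfl)
        (Eab "^" 0 pvMapDir_zero (by norm_num))
      have n1 := pvStep_nog n0 (Eab ">" 1 pvMapDir_one (by norm_num))
      have n2 := pvStep_nog n1 (Eab "v" 2 pvMapDir_two (by norm_num))
      rw [pvStep_min n2 (Eself "<" pvMapDir_three) rfl]
      rfl
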